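-- pv_equiv track=rewrite | github.com/ChrisBernitsas/15-112-Term-Project-Sudoku | randomSolution.py | areLegalValues
-- ===== SOURCE A (Python) =====
-- def areLegalValues(L):
--     seen = set()
--     n=len(L)
--
--     for v in L:
--         if not isinstance(v, int):
--             return False
--         if v<0 or v>n:
--             return False
--         if v!=0 and v in seen:
--             return False
--         seen.add(v)
--     return True
-- ===== SOURCE B (Python) =====
-- def areLegalValues(L):
--     n = len(L)
--     if any(not isinstance(v, int) or v < 0 or v > n for v in L):
--         return False
--     s = sorted(v for v in L if v != 0)
--     return all(a != b for a, b in zip(s, s[1:]))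
-- ===== Notes on version B (the rewrite author's own statement) =====
-- stated objective: alternative
-- what changed: Replaces A's incremental seen-set-and-probe pass with a validity scan followed by sorting the nonzero values and checking that no two adjacent sorted values are equal (sort-then-adjacent-scan duplicate detection).
import Mathlib
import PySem

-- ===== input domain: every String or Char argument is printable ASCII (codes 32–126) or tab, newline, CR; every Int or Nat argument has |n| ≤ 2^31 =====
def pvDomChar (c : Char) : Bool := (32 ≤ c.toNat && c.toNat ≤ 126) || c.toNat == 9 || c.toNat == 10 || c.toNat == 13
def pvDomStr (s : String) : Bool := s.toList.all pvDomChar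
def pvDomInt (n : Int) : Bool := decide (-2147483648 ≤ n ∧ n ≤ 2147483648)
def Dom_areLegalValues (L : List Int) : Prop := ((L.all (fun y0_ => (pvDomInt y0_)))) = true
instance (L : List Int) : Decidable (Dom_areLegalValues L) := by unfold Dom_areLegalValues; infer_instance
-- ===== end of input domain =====

-- B replaces A's incremental seen-set-and-probe loop with a validity scan, then sorts the
-- nonzero values and detects duplicates by checking no two ADJACENT sorted values are equal
-- (sort-then-adjacent-scan; objective: alternative algorithm, not claimed faster).

-- ===== PORT A =====
-- the 'for v in L' loop over state 'seen'; isinstance(v, int) is always true for L : List Int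
def areLegalValuesLoop (n : Int) : List Int → PySem.Set Int → Bool
  | [], _ => true
  | v :: rest, seen =>
    if decide (v < 0) || decide (v > n) then false
    else if decide (v ≠ 0) && PySem.Set.contains seen v then false
    else areLegalValuesLoop n rest (PySem.Set.add seen v)

def areLegalValues (L : List Int) : Bool :=
  areLegalValuesLoop (L.length : Int) L PySem.Set.empty

-- ===== PORT B =====
-- s[1:] on a list is its tail (exact: Python slice from 1 to end); zip + all as in Source B
def areLegalValues_alt (L : List Int) : Bool :=
  let n : Int := L.length
  if L.any (fun v => decide (v < 0) || decide (v > n)) then false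
  else
    let s := PySem.List.sorted (L.filter (fun v => decide (v ≠ 0))) (fun x => x) false
    (s.zip s.tail).all (fun p => decide (p.1 ≠ p.2))

-- ===== PRECONDITION & SPEC =====
def Spec_areLegalValues (L : List Int) (out : Bool) : Prop := out = areLegalValues_alt L
instance (L : List Int) (out : Bool) : Decidable (Spec_areLegalValues L out) := by unfold Spec_areLegalValues; infer_instance

-- ===== CLAIM (what is proved, stated in full; the proofs are below) =====
def Claim_equal_areLegalValues : Prop := ∀ (L : List Int), Dom_areLegalValues L → Spec_areLegalValues L (areLegalValues L)

-- ===== LEMMAS AND PROOFS =====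

-- characterization of A's loop
lemma loop_eq_true_iff (n : Int) (L : List Int) (seen : PySem.Set Int) :
    areLegalValuesLoop n L seen = true ↔
      (∀ v ∈ L, 0 ≤ v ∧ v ≤ n) ∧
      (L.filter (fun v => decide (v ≠ 0))).Nodup ∧
      (∀ v ∈ L, v ≠ 0 → v ∉ seen) := by
  induction L generalizing seen with
  | nil => simp [areLegalValuesLoop]
  | cons v rest ih =>
    simp only [areLegalValuesLoop]
    by_cases h1 : v < 0 ∨ v > n
    · have : (decide (v < 0) || decide (v > n)) = true := by
        rcases h1 with h | h <;> simp [h]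
      rw [this]
      simp only [if_true]
      constructor
      · intro h; exact absurd h (by simp)
      · rintro ⟨hr, -, -⟩
        have := hr v (by simp)
        omega
    · rw [not_or, not_lt, not_lt] at h1
      have hc1 : (decide (v < 0) || decide (v > n)) = false := by
        simp; omega
      rw [hc1]
      simp only [Bool.false_eq_true, if_false]
      by_cases h2 : v ≠ 0 ∧ v ∈ seen
      · have : (decide (v ≠ 0) && PySem.Set.contains seen v) = true := by
          rw [Bool.and_eq_true, decide_eq_true_eq]
          exact ⟨h2.1, (PySem.Set.contains_iff seen v).2 h2.2⟩
        rw [this]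
        simp only [if_true]
        constructor
        · intro h; exact absurd h (by simp)
        · rintro ⟨-, -, hs⟩
          exact absurd h2.2 (hs v (by simp) h2.1)
      · have hc2 : (decide (v ≠ 0) && PySem.Set.contains seen v) = false := by
          by_cases hv0 : v = 0
          · simp [hv0]
          · have hns : v ∉ seen := fun hm => h2 ⟨hv0, hm⟩
            have hcf : PySem.Set.contains seen v = false := by
              rw [← Bool.not_eq_true]
              exact fun h => hns ((PySem.Set.contains_iff seen v).1 h)
            rw [hcf, Bool.and_false]
        rw [hc2]
        simp only [Bool.false_eq_true, if_false]
        rw [ih]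
        by_cases hv0 : v = 0
        · subst hv0
          constructor
          · rintro ⟨hr, hn, hs⟩
            refine ⟨?_, ?_, ?_⟩
            · intro w hw
              rcases List.mem_cons.1 hw with h | h
              · omega
              · exact hr w h
            · simpa using hn
            · intro w hw hw0 hmem
              rcases List.mem_cons.1 hw with h | h
              · exact hw0 h
              · exact hs w h hw0 ((PySem.Set.mem_add _ _ _).2 (Or.inl hmem))
          · rintro ⟨hr, hn, hs⟩
            refine ⟨fun w hw => hr w (List.mem_cons_of_mem _ hw), by simpa using hn, ?_⟩
            intro w hw hw0 hmem
            rcases (PySem.Set.mem_add _ _ _).1 hmem with h | h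
            · exact hs w (List.mem_cons_of_mem _ hw) hw0 h
            · exact hw0 h
        · have hvs : v ∉ seen := fun hm => h2 ⟨hv0, hm⟩
          have hfilter : (v :: rest).filter (fun w => decide (w ≠ 0))
              = v :: rest.filter (fun w => decide (w ≠ 0)) := by
            simp [hv0]
          constructor
          · rintro ⟨hr, hn, hs⟩
            have hvnotin : v ∉ rest.filter (fun w => decide (w ≠ 0)) := by
              intro hmem
              have := hs v (List.mem_filter.1 hmem).1 hv0
              exact this ((PySem.Set.mem_add seen v v).2 (Or.inr rfl))
            refine ⟨?_, ?_, ?_⟩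
            · intro w hw
              rcases List.mem_cons.1 hw with h | h
              · subst h; omega
              · exact hr w h
            · rw [hfilter]; exact List.nodup_cons.2 ⟨hvnotin, hn⟩
            · intro w hw hw0 hmem
              rcases List.mem_cons.1 hw with h | h
              · subst h; exact hvs hmem
              · exact hs w h hw0 (by exact (PySem.Set.mem_add _ _ _).2 (Or.inl hmem))
          · rintro ⟨hr, hn, hs⟩
            rw [hfilter] at hn
            have hnc := List.nodup_cons.1 hn
            refine ⟨fun w hw => hr w (List.mem_cons_of_mem _ hw), hnc.2, ?_⟩
            intro w hw hw0 hmem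
            rcases (PySem.Set.mem_add _ _ _).1 hmem with h | h
            · exact hs w (List.mem_cons_of_mem _ hw) hw0 h
            · subst h
              exact hnc.1 (List.mem_filter.2 ⟨hw, by simpa using hw0⟩)

-- on a weakly increasing list, "no two adjacent elements equal" is exactly Nodup
lemma adj_ne_iff_nodup : ∀ (s : List Int), s.Pairwise (· ≤ ·) →
    (((s.zip s.tail).all (fun p => decide (p.1 ≠ p.2))) = true ↔ s.Nodup)
  | [], _ => by simp
  | [a], _ => by simp
  | a :: b :: t, hp => by
    have hp' : (b :: t).Pairwise (· ≤ ·) := hp.tail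
    have ih := adj_ne_iff_nodup (b :: t) hp'
    have hab : a ≤ b := (List.pairwise_cons.1 hp).1 b (by simp)
    have hble : ∀ x ∈ t, b ≤ x := (List.pairwise_cons.1 hp').1
    simp only [List.tail_cons, List.zip_cons_cons, List.all_cons, Bool.and_eq_true,
      decide_eq_true_eq, List.nodup_cons] at ih ⊢
    constructor
    · rintro ⟨hne, hrest⟩
      have hnd := ih.1 hrest
      refine ⟨?_, hnd⟩
      intro hmem
      rcases List.mem_cons.1 hmem with h | h
      · exact hne h
      · have := hble a h
        have hlt : a < b := lt_of_le_of_ne hab hne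
        omega
    · rintro ⟨hnm, hnd⟩
      exact ⟨fun h => hnm (h ▸ List.mem_cons_self), ih.2 hnd⟩

-- characterization of B
lemma alt_eq_true_iff (L : List Int) :
    areLegalValues_alt L = true ↔
      (∀ v ∈ L, 0 ≤ v ∧ v ≤ (L.length : Int)) ∧
      (L.filter (fun v => decide (v ≠ 0))).Nodup := by
  unfold areLegalValues_alt
  simp only []
  by_cases hbad : L.any (fun v => decide (v < 0) || decide (v > (L.length : Int))) = true
  · rw [if_pos hbad]
    simp only [Bool.false_eq_true, false_iff]
    rintro ⟨hr, -⟩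
    rcases List.any_eq_true.1 hbad with ⟨v, hv, hb⟩
    have := hr v hv
    simp at hb
    omega
  · rw [if_neg hbad]
    have hr : ∀ v ∈ L, 0 ≤ v ∧ v ≤ (L.length : Int) := by
      intro v hv
      by_contra h
      apply hbad
      apply List.any_eq_true.2
      exact ⟨v, hv, by simp; omega⟩
    set nz := L.filter (fun v => decide (v ≠ 0)) with hnz
    set s := PySem.List.sorted nz (fun x => x) false with hs
    have hperm : s.Perm nz := PySem.List.sorted_perm nz (fun x => x) false
    have hpw : s.Pairwise (· ≤ ·) := by
      have := PySem.List.sorted_pairwise nz (fun x => x)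
      simpa using this
    rw [adj_ne_iff_nodup s hpw, hperm.nodup_iff]
    exact ⟨fun h => ⟨hr, h⟩, fun h => h.2⟩

-- ===== VERDICT (by name: the statement is the Claim_ definition above) =====
theorem areLegalValues_spec : Claim_equal_areLegalValues := by
  intro L _
  unfold Spec_areLegalValues areLegalValues
  rw [Bool.eq_iff_iff, loop_eq_true_iff, alt_eq_true_iff]
  constructor
  · rintro ⟨hr, hn, -⟩; exact ⟨hr, hn⟩
  · rintro ⟨hr, hn⟩; exact ⟨hr, hn, by intro v _ _ h; simp [PySem.Set.empty] at h⟩
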